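-- pv_equiv track=rewrite | github.com/svend4/meta | projects/hexglyph/solan_run.py | analyze_cell
-- ===== SOURCE A (Python) =====
-- from typing import Any
--
-- def analyze_cell(seq: list[int]) -> dict[str, Any]:
--     """Turn / monotone-step statistics for a single cell's time series.
--
--     Parameters
--     ──────────
--     seq  : list[int]  — cell values at orbit steps t = 0 … P−1
--
--     Returns dict with keys:
--         n_turns     : int    — number of direction reversals (local extrema)
--         n_inc       : int    — steps where value increases
--         n_dec       : int    — steps where value decreases
--         n_const     : int    — steps where value is unchanged
--         value_range : int    — max(seq) − min(seq)
--         min_val     : int    — minimum value in sequence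
--         max_val     : int    — maximum value in sequence
--     """
--     P = len(seq)
--     n_inc = n_dec = n_const = 0
--     for t in range(P - 1):
--         d = seq[t + 1] - seq[t]
--         if d > 0:
--             n_inc += 1
--         elif d < 0:
--             n_dec += 1
--         else:
--             n_const += 1
--
--     # Count turns: sign reversals in the sequence of non-zero deltas
--     n_turns  = 0
--     last_sign = 0
--     for t in range(P - 1):
--         d = seq[t + 1] - seq[t]
--         if d > 0:
--             if last_sign < 0:
--                 n_turns += 1
--             last_sign = 1
--         elif d < 0:
--             if last_sign > 0:
--                 n_turns += 1
--             last_sign = -1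
--
--     return {
--         'n_turns':     n_turns,
--         'n_inc':       n_inc,
--         'n_dec':       n_dec,
--         'n_const':     n_const,
--         'value_range': max(seq) - min(seq),
--         'min_val':     min(seq),
--         'max_val':     max(seq),
--     }
-- ===== SOURCE B (Python) =====
-- def analyze_cell(seq: list[int]) -> dict:
--     # Run-compress the sequence (drop consecutive duplicates); then all
--     # statistics fall out of the compressed list u: its strict deltas are
--     # exactly the nonzero deltas of seq, turns are its local extrema.
--     u = []
--     for v in seq:
--         if not u or u[-1] != v:
--             u.append(v)
--     n_inc = sum(1 for a, b in zip(u, u[1:]) if a < b)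
--     n_dec = len(u) - 1 - n_inc
--     n_const = len(seq) - len(u)
--     n_turns = sum(1 for a, b, c in zip(u, u[1:], u[2:]) if (a < b) != (b < c))
--     return {
--         'n_turns':     n_turns,
--         'n_inc':       n_inc,
--         'n_dec':       n_dec,
--         'n_const':     n_const,
--         'value_range': max(seq) - min(seq),
--         'min_val':     min(seq),
--         'max_val':     max(seq),
--     }
-- ===== Notes on version B (the rewrite author's own statement) =====
-- stated objective: alternative
-- what changed: Instead of two stateful delta scans, B run-compresses the sequence (dropping consecutive duplicates) and derives everything from the compressed list u: n_inc counts rises of u, n_dec and n_const come from length arithmetic (len(u)-1-n_inc, len(seq)-len(u)), and n_turns counts local extrema of u via a triple window (a<b)!=(b<c).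
-- outside the precondition, e.g. on analyze_cell([]): A raises ValueError, B raises ValueError
import Mathlib
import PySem

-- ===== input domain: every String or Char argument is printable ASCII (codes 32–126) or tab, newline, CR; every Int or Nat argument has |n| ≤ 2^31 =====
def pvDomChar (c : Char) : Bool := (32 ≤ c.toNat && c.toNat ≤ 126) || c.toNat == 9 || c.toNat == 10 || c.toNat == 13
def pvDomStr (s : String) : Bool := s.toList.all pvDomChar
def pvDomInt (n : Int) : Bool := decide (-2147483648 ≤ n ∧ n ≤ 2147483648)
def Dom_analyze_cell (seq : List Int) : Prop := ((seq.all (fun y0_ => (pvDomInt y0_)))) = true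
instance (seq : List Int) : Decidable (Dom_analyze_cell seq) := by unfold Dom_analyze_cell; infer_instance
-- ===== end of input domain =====

-- B run-compresses the sequence and reads all statistics off the compressed list:
-- rises of u, length arithmetic for n_dec/n_const, local extrema of u for turns
-- (objective: alternative decomposition).

-- ===== PORT A =====
def analyze_cell (seq : List Int) : List (String × Int) :=
  let P : Int := PySem.List.len seq
  let counts :=
    (PySem.List.pyRange 0 (P - 1) 1).foldl
      (fun (acc : Int × Int × Int) t =>
        if 0 < PySem.List.pyGetD seq (t + 1) 0 - PySem.List.pyGetD seq t 0 then
          (acc.1 + 1, acc.2.1, acc.2.2)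
        else if PySem.List.pyGetD seq (t + 1) 0 - PySem.List.pyGetD seq t 0 < 0 then
          (acc.1, acc.2.1 + 1, acc.2.2)
        else (acc.1, acc.2.1, acc.2.2 + 1)) (0, 0, 0)
  let turns :=
    (PySem.List.pyRange 0 (P - 1) 1).foldl
      (fun (acc : Int × Int) t =>
        if 0 < PySem.List.pyGetD seq (t + 1) 0 - PySem.List.pyGetD seq t 0 then
          (if acc.2 < 0 then acc.1 + 1 else acc.1, 1)
        else if PySem.List.pyGetD seq (t + 1) 0 - PySem.List.pyGetD seq t 0 < 0 then
          (if 0 < acc.2 then acc.1 + 1 else acc.1, -1)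
        else acc) (0, 0)
  let mx := (PySem.List.max? seq (fun x => x)).getD 0
  let mn := (PySem.List.min? seq (fun x => x)).getD 0
  [("n_turns", turns.1), ("n_inc", counts.1), ("n_dec", counts.2.1),
   ("n_const", counts.2.2), ("value_range", mx - mn), ("min_val", mn), ("max_val", mx)]

-- ===== PORT B =====
def analyze_cell_alt (seq : List Int) : List (String × Int) :=
  let u := seq.foldl
    (fun acc v => if acc.isEmpty || (acc.getLast? != some v) then acc ++ [v] else acc) []
  let n_inc : Int := ((u.zip (u.drop 1)).countP (fun p => decide (p.1 < p.2)) : Nat)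
  let n_dec : Int := (u.length : Int) - 1 - n_inc
  let n_const : Int := (seq.length : Int) - (u.length : Int)
  let n_turns : Int :=
    (((u.zip (u.drop 1)).zip (u.drop 2)).countP
      (fun p => decide (p.1.1 < p.1.2) != decide (p.1.2 < p.2)) : Nat)
  let mx := (PySem.List.max? seq (fun x => x)).getD 0
  let mn := (PySem.List.min? seq (fun x => x)).getD 0
  [("n_turns", n_turns), ("n_inc", n_inc), ("n_dec", n_dec),
   ("n_const", n_const), ("value_range", mx - mn), ("min_val", mn), ("max_val", mx)]

-- ===== PRECONDITION & SPEC =====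
-- Python A raises ValueError (max/min of empty sequence) on []; B raises there too.
def Pre_analyze_cell (seq : List Int) : Prop := seq ≠ []
instance (seq : List Int) : Decidable (Pre_analyze_cell seq) := by unfold Pre_analyze_cell; infer_instance
def pvWitness_analyze_cell : List Int := [1, 3, 2, 2, 5]

def Spec_analyze_cell (seq : List Int) (out : List (String × Int)) : Prop := out = analyze_cell_alt seq
instance (seq : List Int) (out : List (String × Int)) : Decidable (Spec_analyze_cell seq out) := by unfold Spec_analyze_cell; infer_instance

-- ===== CLAIM =====
def Claim_equal_analyze_cell : Prop := ∀ (seq : List Int), Dom_analyze_cell seq → Pre_analyze_cell seq → Spec_analyze_cell seq (analyze_cell seq)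

-- ===== LEMMAS AND PROOFS =====

-- the delta list of a sequence
def pvDeltas (seq : List Int) : List Int := (seq.zip (seq.drop 1)).map (fun p => p.2 - p.1)

-- A's turn count as a recursion over the sign list, carrying the last sign
def pvCt : Int → List Int → Int
  | _, [] => 0
  | ls, s :: S => (if ls ≠ 0 ∧ s ≠ ls then 1 else 0) + pvCt s S

-- run-compression (B's u) as structural recursion
def pvU' (a : Int) : List Int → List Int
  | [] => []
  | b :: r => if b = a then pvU' a r else b :: pvU' b r

def pvU : List Int → List Int
  | [] => []
  | a :: r => a :: pvU' a r

lemma pvRangeMapDelta (seq : List Int) :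
    (PySem.List.pyRange 0 (PySem.List.len seq - 1) 1).map
      (fun t => PySem.List.pyGetD seq (t + 1) 0 - PySem.List.pyGetD seq t 0)
    = pvDeltas seq := by
  apply List.ext_getElem
  · simp [pvDeltas, PySem.List.len]
  · intro k h1 h2
    have hk : k < seq.length - 1 := by
      simpa [PySem.List.len] using h1
    simp only [List.getElem_map, PySem.List.getElem_pyRange_one, zero_add, pvDeltas,
      List.getElem_zip, List.getElem_drop]
    have e1 : (k : Int) + 1 = ((k + 1 : Nat) : Int) := by push_cast; ring
    rw [e1, PySem.List.pyGetD_natCast, PySem.List.pyGetD_natCast]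
    rw [List.getD_eq_getElem seq 0 (by omega), List.getD_eq_getElem seq 0 (by omega)]
    simp [Nat.add_comm 1 k]

lemma pvCountsFold (D : List Int) (a b c : Int) :
    D.foldl
      (fun (acc : Int × Int × Int) d =>
        if 0 < d then (acc.1 + 1, acc.2.1, acc.2.2)
        else if d < 0 then (acc.1, acc.2.1 + 1, acc.2.2)
        else (acc.1, acc.2.1, acc.2.2 + 1)) (a, b, c)
    = (a + D.countP (fun d => decide (0 < d)),
       b + D.countP (fun d => decide (d < 0)),
       c + D.countP (fun d => decide (d = 0))) := by
  induction D generalizing a b c with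
  | nil => simp
  | cons d D ih =>
    simp only [List.foldl_cons, List.countP_cons]
    rcases lt_trichotomy 0 d with h | h | h
    · simp only [if_pos h, ih]
      have h1 : ¬ d < 0 := by omega
      have h2 : ¬ d = 0 := by omega
      simp [h, h1, h2]; ring
    · simp only [← h]
      simp [ih]; ring
    · have h1 : ¬ 0 < d := by omega
      have h2 : ¬ d = 0 := by omega
      simp only [if_neg h1, if_pos h, ih]
      simp [h, h1, h2]; ring

lemma pvTriCount (D : List Int) :
    D.countP (fun d => decide (0 < d)) + D.countP (fun d => decide (d < 0))
      + D.countP (fun d => decide (d = 0)) = D.length := by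
  induction D with
  | nil => simp
  | cons d D ih =>
    simp only [List.countP_cons, List.length_cons]
    rcases lt_trichotomy 0 d with h | h | h <;>
      · first
        | (have h1 : ¬ d < 0 := by omega
           have h2 : ¬ d = 0 := by omega
           simp [h, h1, h2]; omega)
        | (simp [← h]; omega)
        | (have h1 : ¬ 0 < d := by omega
           have h2 : ¬ d = 0 := by omega
           simp [h, h1, h2]; omega)

lemma pvNeCount (D : List Int) :
    D.countP (fun d => decide (d ≠ 0))
      = D.countP (fun d => decide (0 < d)) + D.countP (fun d => decide (d < 0)) := by
  induction D with
  | nil => simp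
  | cons d D ih =>
    simp only [List.countP_cons, decide_not] at ih ⊢
    rcases lt_trichotomy 0 d with h | h | h
    · have h1 : ¬ d < 0 := by omega
      have h2 : ¬ d = 0 := by omega
      simp [h, h1, h2]; omega
    · simp [← h]; omega
    · have h1 : ¬ 0 < d := by omega
      have h2 : ¬ d = 0 := by omega
      simp [h, h1, h2]; omega

lemma pvTurnsFoldA (D : List Int) (n ls : Int) (h : ls = 0 ∨ ls = 1 ∨ ls = -1) :
    (D.foldl
      (fun (acc : Int × Int) d =>
        if 0 < d then (if acc.2 < 0 then acc.1 + 1 else acc.1, 1)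
        else if d < 0 then (if 0 < acc.2 then acc.1 + 1 else acc.1, -1)
        else acc) (n, ls)).1
    = n + pvCt ls ((D.filter (fun d => decide (d ≠ 0))).map (fun d => if 0 < d then (1 : Int) else -1)) := by
  induction D generalizing n ls with
  | nil => simp [pvCt]
  | cons d D ih =>
    simp only [List.foldl_cons, List.filter_cons]
    rcases lt_trichotomy 0 d with hd | hd | hd
    · have hne : d ≠ 0 := by omega
      have hnlt : ¬ d < 0 := by omega
      rw [if_pos hd]
      rw [ih _ 1 (Or.inr (Or.inl rfl))]
      simp only [hne, decide_not]
      rcases h with h | h | h <;> simp [h, pvCt, hd] <;> ring_nf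
    · subst hd
      simp only [lt_irrefl, if_false, decide_not]
      rw [ih _ ls h]
      simp
    · have hne : d ≠ 0 := by omega
      have hnlt : ¬ 0 < d := by omega
      rw [if_neg hnlt, if_pos hd]
      rw [ih _ (-1) (Or.inr (Or.inr rfl))]
      simp only [hne, decide_not]
      rcases h with h | h | h <;> simp [h, pvCt, hnlt] <;> ring_nf

lemma pvAdjAux (s : Int) (S : List Int) (hs : s ≠ 0) (hS : ∀ t ∈ S, t = 1 ∨ t = -1) :
    pvCt s S = ((s :: S).zip S).countP (fun p => decide (p.1 ≠ p.2)) := by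
  induction S generalizing s with
  | nil => simp [pvCt]
  | cons t S ih =>
    have ht : t ≠ 0 := by rcases hS t (by simp) with h | h <;> omega
    simp only [List.zip_cons_cons, List.countP_cons, pvCt]
    rw [ih t ht (fun u hu => hS u (by simp [hu]))]
    by_cases hst : s = t
    · simp [hst]
    · simp [hst, hs, Ne.symm hst]; ring_nf

lemma pvAdj (S : List Int) (hS : ∀ t ∈ S, t = 1 ∨ t = -1) :
    ((S.zip (S.drop 1)).countP (fun p => decide (p.1 ≠ p.2)) : Int) = pvCt 0 S := by
  cases S with
  | nil => simp [pvCt]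
  | cons s S =>
    have hs : s ≠ 0 := by rcases hS s (by simp) with h | h <;> omega
    rw [List.drop_one, List.tail_cons]
    rw [pvCt, pvAdjAux s S hs (fun u hu => hS u (by simp [hu]))]
    simp [hs]

lemma pvBridge {σ : Type} (seq : List Int) (F : σ → Int → σ) (init : σ) :
    (PySem.List.pyRange 0 (PySem.List.len seq - 1) 1).foldl
      (fun acc t => F acc (PySem.List.pyGetD seq (t + 1) 0 - PySem.List.pyGetD seq t 0)) init
    = (pvDeltas seq).foldl F init := by
  rw [← pvRangeMapDelta seq, List.foldl_map]

-- B's append-loop computes pvU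
lemma pvFoldStep (r : List Int) (pre : List Int) (a : Int) :
    r.foldl (fun acc v => if acc.isEmpty || (acc.getLast? != some v) then acc ++ [v] else acc)
      (pre ++ [a]) = pre ++ a :: pvU' a r := by
  induction r generalizing pre a with
  | nil => simp [pvU']
  | cons b r ih =>
    simp only [List.foldl_cons]
    have h1 : (pre ++ [a]).isEmpty = false := by simp
    have h2 : (pre ++ [a]).getLast? = some a := by simp
    by_cases hba : b = a
    · have hb : (some a != some b) = false := by simp [hba]
      rw [h1, h2, hb]
      rw [if_neg (by simp)]
      rw [ih pre a]
      simp [pvU', hba]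
    · have hb : (some a != some b) = true := by
        simp only [bne_iff_ne, ne_eq, Option.some.injEq]
        exact fun h => hba h.symm
      rw [h1, h2, hb]
      simp only [Bool.or_true]
      simp only [if_true]
      rw [ih (pre ++ [a]) b]
      simp [pvU', hba]

lemma pvFoldU (seq : List Int) :
    seq.foldl (fun acc v => if acc.isEmpty || (acc.getLast? != some v) then acc ++ [v] else acc) []
      = pvU seq := by
  cases seq with
  | nil => rfl
  | cons a r =>
    simp only [List.foldl_cons, List.isEmpty_nil, Bool.true_or, if_pos rfl, List.nil_append]
    have := pvFoldStep r [] a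
    simpa [pvU] using this

lemma pvDeltas_cons2 (a b : Int) (t : List Int) :
    pvDeltas (a :: b :: t) = (b - a) :: pvDeltas (b :: t) := rfl

-- deltas of the compressed list are exactly the nonzero deltas
lemma pvDeltasU' (a : Int) (r : List Int) :
    pvDeltas (a :: pvU' a r) = (pvDeltas (a :: r)).filter (fun d => decide (d ≠ 0)) := by
  induction r generalizing a with
  | nil => simp [pvU', pvDeltas]
  | cons b r ih =>
    by_cases hba : b = a
    · subst hba
      simp only [pvU', if_pos rfl, pvDeltas_cons2, List.filter_cons]
      simp [ih]
    · simp only [pvU', if_neg hba, pvDeltas_cons2, List.filter_cons]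
      have hne : b - a ≠ 0 := by omega
      simp [hne, ih b]

lemma pvDeltasLen (seq : List Int) : (pvDeltas seq).length = seq.length - 1 := by
  cases seq with
  | nil => rfl
  | cons a r => simp [pvDeltas, List.length_zip]

lemma pvCountZip (u : List Int) (p : Int → Bool) :
    (u.zip (u.drop 1)).countP (fun q => p (q.2 - q.1)) = (pvDeltas u).countP p := by
  simp only [pvDeltas, List.countP_map]
  rfl

-- triple-window extrema count of u = adjacent-unequal count of its delta signs
lemma pvTriple (u : List Int) (h : ∀ d ∈ pvDeltas u, d ≠ 0) :
    ((u.zip (u.drop 1)).zip (u.drop 2)).countP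
        (fun p => decide (p.1.1 < p.1.2) != decide (p.1.2 < p.2))
    = (((pvDeltas u).map (fun d => if 0 < d then (1 : Int) else -1)).zip
       (((pvDeltas u).map (fun d => if 0 < d then (1 : Int) else -1)).drop 1)).countP
        (fun p => decide (p.1 ≠ p.2)) := by
  induction u with
  | nil => rfl
  | cons a t ih =>
    cases t with
    | nil => rfl
    | cons b t' =>
      cases t' with
      | nil => rfl
      | cons c t'' =>
        have hab : b - a ≠ 0 := h _ (by simp [pvDeltas_cons2])
        have hbc : c - b ≠ 0 := h _ (by simp [pvDeltas_cons2])
        have htail : ∀ d ∈ pvDeltas (b :: c :: t''), d ≠ 0 := by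
          intro d hd
          exact h d (by rw [pvDeltas_cons2]; exact List.mem_cons_of_mem _ hd)
        have ihx := ih htail
        simp only [pvDeltas_cons2, List.map_cons] at ihx ⊢
        simp only [List.drop_succ_cons, List.drop_zero, List.zip_cons_cons,
          List.countP_cons, List.drop_one, List.tail_cons] at ihx ⊢
        rw [ihx]
        congr 1
        by_cases h1 : a < b <;> by_cases h2 : b < c <;>
          · have s1 : (0 < b - a) = (a < b) := by simp [sub_pos]
            have s2 : (0 < c - b) = (b < c) := by simp [sub_pos]
            simp [s1, s2, h1, h2] <;> omega

-- ===== VERDICT =====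
theorem analyze_cell_spec : Claim_equal_analyze_cell := by
  intro seq hdom hpre
  unfold Spec_analyze_cell
  obtain ⟨a, r, rfl⟩ : ∃ a r, seq = a :: r := by
    cases seq with
    | nil => exact absurd rfl hpre
    | cons a r => exact ⟨a, r, rfl⟩
  simp only [analyze_cell, analyze_cell_alt]
  rw [pvFoldU]
  set seq := a :: r with hseq
  set u := pvU seq with hu
  -- A-side folds over the delta list
  rw [pvBridge seq (fun (acc : Int × Int × Int) d =>
        if 0 < d then (acc.1 + 1, acc.2.1, acc.2.2)
        else if d < 0 then (acc.1, acc.2.1 + 1, acc.2.2)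
        else (acc.1, acc.2.1, acc.2.2 + 1)) ((0 : Int), (0 : Int), (0 : Int))]
  rw [pvBridge seq (fun (acc : Int × Int) d =>
        if 0 < d then (if acc.2 < 0 then acc.1 + 1 else acc.1, 1)
        else if d < 0 then (if 0 < acc.2 then acc.1 + 1 else acc.1, -1)
        else acc) ((0 : Int), (0 : Int))]
  rw [pvCountsFold, pvTurnsFoldA _ 0 0 (Or.inl rfl)]
  -- B-side: compressed deltas are the nonzero deltas
  have hUD : pvDeltas u = (pvDeltas seq).filter (fun d => decide (d ≠ 0)) := by
    rw [hu, hseq]; exact pvDeltasU' a r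
  have hUne : ∀ d ∈ pvDeltas u, d ≠ 0 := by
    intro d hd; rw [hUD] at hd
    simpa using (List.mem_filter.mp hd).2
  have hsig : ∀ s ∈ (pvDeltas u).map (fun d => if 0 < d then (1 : Int) else -1),
      s = 1 ∨ s = -1 := by
    intro s hs
    simp only [List.mem_map] at hs
    obtain ⟨d, _, rfl⟩ := hs
    by_cases h0 : 0 < d <;> simp [h0]
  -- counts on u in terms of (pvDeltas seq)
  have hinc : (u.zip (u.drop 1)).countP (fun p => decide (p.1 < p.2))
      = (pvDeltas seq).countP (fun d => decide (0 < d)) := by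
    have e : (fun p : Int × Int => decide (p.1 < p.2))
        = (fun p : Int × Int => decide (0 < p.2 - p.1)) := by
      funext p; exact decide_eq_decide.mpr sub_pos.symm
    rw [e, pvCountZip u (fun d => decide (0 < d)), hUD, List.countP_filter]
    apply List.countP_congr
    intro d _
    by_cases h0 : 0 < d <;> simp [h0] <;> omega
  have hulen : u.length = (pvDeltas seq).countP (fun d => decide (d ≠ 0)) + 1 := by
    have h1 : (pvDeltas u).length = u.length - 1 := pvDeltasLen u
    have h2 : (pvDeltas u).length = (pvDeltas seq).countP (fun d => decide (d ≠ 0)) := by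
      rw [hUD, ← List.countP_eq_length_filter]
    have h3 : u ≠ [] := by rw [hu, hseq]; simp [pvU]
    have h4 : 1 ≤ u.length := List.length_pos_iff.mpr h3
    omega
  have hslen : seq.length = (pvDeltas seq).length + 1 := by
    have := pvDeltasLen seq
    simp [hseq] at this ⊢
    omega
  -- turns on u
  have hturn : (((u.zip (u.drop 1)).zip (u.drop 2)).countP
      (fun p => decide (p.1.1 < p.1.2) != decide (p.1.2 < p.2)) : Int)
      = pvCt 0 (((pvDeltas seq).filter (fun d => decide (d ≠ 0))).map (fun d => if 0 < d then (1 : Int) else -1)) := by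
    rw [pvTriple u hUne, pvAdj _ hsig, hUD]
  have htri := pvTriCount (pvDeltas seq)
  have hne := pvNeCount (pvDeltas seq)
  simp only [List.cons.injEq, Prod.mk.injEq, true_and, and_true]
  refine ⟨?_, ?_, ?_, ?_⟩
  · rw [← hturn]; push_cast; ring
  · rw [hinc]; push_cast; ring
  · rw [hinc, hulen]; push_cast; omega
  · rw [hulen, hslen]; push_cast; omega
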